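-- pv_equiv track=rewrite | github.com/Zheka-m-p/Python-Ylab | HomeWork1.py | count_find_num
-- ===== SOURCE A (Python) =====
-- from math import prod
--
-- def count_find_num(primesL, limit):
--     p = prod(primesL)
--     if p > limit:
--         return []
--     else:
--         count = 0
--         minim = min(primesL)  # минимальное из простых чисел, вдруг там не в порядке возрастания даны
--         while minim * p <= limit:
--             count += 1
--             p = minim * p
--         p = prod(primesL)
--         ans = [p]
--         maxim = p  # максимальное значение, если нет чисел, удовлетворящих усовию кроме чисел из произведения списка
--         count_ans = 1
--         for i in range(count):
--             ans1 = []
--             for j in ans: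
--                 for k in primesL:
--                     if k * j <= limit:
--                         ans1.append(k * j)
--             ans = list(set(ans1))
--             count_ans += len(ans)
--             maxim = max(maxim, max(ans))
--     return [count_ans, maxim]
-- ===== SOURCE B (Python) =====
-- def count_find_num(primesL, limit):
--     p = 1
--     for q in primesL:
--         p *= q
--     if p > limit:
--         return []
--     primes = sorted(set(primesL))
--
--     def dfs(v, qs):
--         # qs is a suffix of primes; counts v itself and every product
--         # v * (multiset over elements of qs), each distinct product exactly once
--         count, best = 1, v
--         t = qs
--         while t:
--             w = v * t[0]
--             if w <= limit:
--                 c, b = dfs(w, t)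
--                 count += c
--                 best = max(best, b)
--             t = t[1:]
--         return count, best
--
--     count, best = dfs(p, primes)
--     return [count, best]
-- ===== Notes on version B (the rewrite author's own statement) =====
-- stated objective: alternative
-- what changed: B replaces A's level-by-level BFS with set deduplication (and its power-of-min depth pre-loop) by an ordered depth-first recursion over the distinct sorted primes that, by restricting each recursive call to a suffix of the prime list, enumerates every distinct product exactly once with no set and no level bookkeeping, accumulating count and max on the way.
-- outside the precondition, e.g. on count_find_num([4, 6, 9], 10000): A returns [7, 7776], B returns [8, 7776]; on count_find_num([-2, 3], 0): A returns [1, -6], B raises RecursionError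
import Mathlib
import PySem

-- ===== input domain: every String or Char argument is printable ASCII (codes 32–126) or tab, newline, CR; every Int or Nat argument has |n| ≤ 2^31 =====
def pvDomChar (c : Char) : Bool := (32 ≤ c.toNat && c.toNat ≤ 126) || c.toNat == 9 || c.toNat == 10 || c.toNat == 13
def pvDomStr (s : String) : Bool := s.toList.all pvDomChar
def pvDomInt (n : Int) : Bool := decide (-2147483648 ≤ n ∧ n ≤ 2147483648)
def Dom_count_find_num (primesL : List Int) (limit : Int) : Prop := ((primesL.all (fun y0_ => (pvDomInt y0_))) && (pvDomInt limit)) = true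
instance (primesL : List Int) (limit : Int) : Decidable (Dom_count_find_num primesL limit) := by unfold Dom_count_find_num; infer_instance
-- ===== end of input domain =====

-- B replaces A's level-by-level BFS with set deduplication (and its power-of-min pre-loop) by an
-- ordered depth-first recursion over the distinct sorted primes, each distinct product visited once.

-- ===== PORT A =====
-- 'while minim * p <= limit: count += 1; p = minim * p' — fuel-bounded; fuel limit.natAbs + 2 is
-- proved sufficient on Pre_ (the product at least doubles each step).
def aWhile (minim limit : Int) : Nat → Int → Nat × Int
  | 0, p => (0, p)
  | fuel+1, p =>
    if minim * p ≤ limit then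
      let r := aWhile minim limit fuel (minim * p)
      (r.1 + 1, r.2)
    else (0, p)

-- the two inner 'for j in ans: for k in primesL: if k*j <= limit: ans1.append(k*j)' loops
def aAns1 (primesL : List Int) (limit : Int) (ans : List Int) : List Int :=
  ans.foldl (fun acc j =>
    primesL.foldl (fun acc k => if k * j ≤ limit then acc ++ [k * j] else acc) acc) []

-- 'for i in range(count): …' returning (count_ans, maxim)
def aLoop (primesL : List Int) (limit : Int) : Nat → List Int → Int → Int → Int × Int
  | 0, _, count_ans, maxim => (count_ans, maxim)
  | n+1, ans, count_ans, maxim =>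
    let ans' : List Int := PySem.Set.ofList (aAns1 primesL limit ans)
    let count_ans' := count_ans + (ans'.length : Int)
    match PySem.List.max? ans' (fun x => x) with
    | none => (count_ans', maxim)   -- Python raises ValueError on max([]); unreachable under Pre_
    | some m => aLoop primesL limit n ans' count_ans' (max maxim m)

def count_find_num (primesL : List Int) (limit : Int) : List Int :=
  let p := primesL.foldl (· * ·) 1
  if p > limit then []
  else
    match PySem.List.min? primesL (fun x => x) with
    | none => []   -- Python raises ValueError on min([]); excluded by Pre_
    | some minim =>
      let c := (aWhile minim limit (limit.natAbs + 2) p).1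
      let r := aLoop primesL limit c [p] 1 p
      [r.1, r.2]

-- ===== PORT B =====
-- 'def dfs(v, qs): … while t: …; t = t[1:]' — the while over successive suffixes of qs is the foldl
-- over qs.tails (the trailing [] contributes nothing, matching 'while t:'); the recursion depth is
-- fuel-bounded, fuel limit.natAbs + 2 proved sufficient on Pre_ (v at least doubles per call).
def bDfs (limit : Int) : Nat → Int → List Int → Int × Int
  | 0, v, _ => (1, v)   -- fuel exhaustion; unreachable under Pre_
  | fuel+1, v, qs =>
    qs.tails.foldl (fun acc t =>
      match t with
      | [] => acc
      | q :: _ =>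
        if v * q ≤ limit then
          let r := bDfs limit fuel (v * q) t
          (acc.1 + r.1, max acc.2 r.2)
        else acc) (1, v)

def count_find_num_alt (primesL : List Int) (limit : Int) : List Int :=
  let p := primesL.foldl (· * ·) 1
  if p > limit then []
  else
    let primes := PySem.List.sorted (PySem.Set.ofList primesL) (fun x => x) false
    let r := bDfs limit (limit.natAbs + 2) p primes
    [r.1, r.2]

-- ===== PRECONDITION & SPEC =====
-- Pre_ restricts to the function's natural domain (a list of primes) when the product is within the
-- limit: it excludes (a) the empty list with 1 ≤ limit (A raises ValueError on min([])), (b) lists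
-- with an entry < 2 (A or B can diverge there), and (c) lists with a composite entry, on which the
-- products are not in bijection with factor multisets and A's per-level distinct-value count and B's
-- per-factorization count legitimately differ.  When the product exceeds the limit both return [].
def Pre_count_find_num (primesL : List Int) (limit : Int) : Prop :=
  limit < primesL.foldl (· * ·) 1 ∨
    (primesL ≠ [] ∧ ∀ x ∈ primesL, 2 ≤ x ∧ x.natAbs.Prime)
instance (primesL : List Int) (limit : Int) : Decidable (Pre_count_find_num primesL limit) := by
  unfold Pre_count_find_num; infer_instance
def pvWitness_count_find_num : List Int × Int := ([2, 3], 100)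

def Spec_count_find_num (primesL : List Int) (limit : Int) (out : List Int) : Prop := out = count_find_num_alt primesL limit
instance (primesL : List Int) (limit : Int) (out : List Int) : Decidable (Spec_count_find_num primesL limit out) := by unfold Spec_count_find_num; infer_instance

-- ===== CLAIM (what is proved, stated in full; the proofs are below) =====
def Claim_equal_count_find_num : Prop := ∀ (primesL : List Int) (limit : Int), Dom_count_find_num primesL limit → Pre_count_find_num primesL limit → Spec_count_find_num primesL limit (count_find_num primesL limit)

-- ===== LEMMAS AND PROOFS =====

-- ---- generic arithmetic / multiset facts ----
theorem pvFoldlMul_ge_one (l : List Int) (a : Int) (ha : 1 ≤ a) (h : ∀ x ∈ l, 2 ≤ x) :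
    1 ≤ l.foldl (· * ·) a := by
  induction l generalizing a with
  | nil => simpa using ha
  | cons x t ih =>
    simp only [List.foldl_cons]
    apply ih
    · have hx : 2 ≤ x := h x (by simp)
      nlinarith
    · intro y hy; exact h y (by simp [hy])

theorem pvProd_ge_one (s : Multiset Int) (h : ∀ a ∈ s, 2 ≤ a) : 1 ≤ s.prod := by
  induction s using Multiset.induction with
  | empty => simp
  | cons a s ih =>
    have ha : 2 ≤ a := h a (by simp)
    have hs : 1 ≤ s.prod := ih (fun b hb => h b (by simp [hb]))
    rw [Multiset.prod_cons]
    nlinarith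

theorem pvProd_ge_pow (s : Multiset Int) (m : Int) (hm : 2 ≤ m) (h : ∀ a ∈ s, 2 ≤ a ∧ m ≤ a) :
    m ^ s.card ≤ s.prod := by
  induction s using Multiset.induction with
  | empty => simp
  | cons a s ih =>
    have ha := h a (by simp)
    have hs : m ^ s.card ≤ s.prod := ih (fun b hb => h b (by simp [hb]))
    have hs1 : 1 ≤ s.prod := pvProd_ge_one s (fun b hb => (h b (by simp [hb])).1)
    rw [Multiset.prod_cons, Multiset.card_cons, pow_succ]
    have hmp : (0:Int) < m ^ s.card := by positivity
    nlinarith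

-- unique factorization: two multisets of (positive) primes with equal product are equal
theorem pvPrimeInj (s : Multiset Int) : ∀ (t : Multiset Int),
    (∀ a ∈ s, 2 ≤ a ∧ Prime a) → (∀ a ∈ t, 2 ≤ a ∧ Prime a) → s.prod = t.prod → s = t := by
  induction s using Multiset.induction with
  | empty =>
    intro t _ ht h
    by_contra hne
    obtain ⟨a, ha⟩ := Multiset.exists_mem_of_ne_zero (fun h0 => hne h0.symm)
    obtain ⟨t', rfl⟩ : ∃ t', t = a ::ₘ t' := ⟨t.erase a, (Multiset.cons_erase ha).symm⟩
    have h1 : 1 ≤ t'.prod := pvProd_ge_one t' (fun b hb => (ht b (by simp [hb])).1)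
    have ha2 : 2 ≤ a := (ht a (by simp)).1
    rw [Multiset.prod_zero, Multiset.prod_cons] at h
    nlinarith
  | cons a s ih =>
    intro t hs ht h
    have hap : Prime a := (hs a (by simp)).2
    have hdvd : a ∣ t.prod := by
      rw [← h, Multiset.prod_cons]; exact Dvd.intro _ rfl
    obtain ⟨b, hb, hab⟩ := hap.exists_mem_multiset_dvd hdvd
    have hbp : Prime b := (ht b hb).2
    have hassoc : Associated a b := hap.associated_of_dvd hbp hab
    have hab' : a = b := by
      rcases Int.associated_iff.mp hassoc with h' | h'
      · exact h'
      · have := (hs a (by simp)).1; have := (ht b hb).1; omega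
    subst hab'
    obtain ⟨t', rfl⟩ : ∃ t', t = a ::ₘ t' := ⟨t.erase a, (Multiset.cons_erase hb).symm⟩
    have hane : a ≠ 0 := by have := (hs a (by simp)).1; omega
    rw [Multiset.prod_cons, Multiset.prod_cons] at h
    have hst : s.prod = t'.prod := by
      exact mul_left_cancel₀ hane h
    rw [ih t' (fun x hx => hs x (by simp [hx])) (fun x hx => ht x (by simp [hx])) hst]

-- ---- folds of max ----
theorem pvFoldlMax_const (t : List Int) (c : Int) (h : ∀ x ∈ t, x ≤ c) : t.foldl max c = c := by
  induction t with
  | nil => rfl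
  | cons a s ih =>
    simp only [List.foldl_cons]
    rw [max_eq_left (h a (by simp))]
    exact ih (fun x hx => h x (by simp [hx]))

theorem pvFoldlMax_eq (m : Int) :
    ∀ (l : List Int) (b : Int), m ∈ l → (∀ x ∈ l, x ≤ m) → l.foldl max b = max b m := by
  intro l
  induction l with
  | nil => intro b hm; simp at hm
  | cons a t ih =>
    intro b hm hle
    simp only [List.foldl_cons]
    rcases List.mem_cons.mp hm with rfl | hmt
    · by_cases hmt' : m ∈ t
      · rw [ih _ hmt' (fun x hx => hle x (by simp [hx]))]
        rw [max_assoc, max_self]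
      · exact pvFoldlMax_const t (max b m)
          (fun x hx => le_trans (hle x (by simp [hx])) (le_max_right b m))
    · rw [ih _ hmt (fun x hx => hle x (by simp [hx]))]
      have ha : a ≤ m := hle a (by simp)
      rw [max_assoc, max_eq_right ha]

theorem pvFoldlMax_max (l : List Int) : ∀ (a b : Int),
    l.foldl max (max a b) = max a (l.foldl max b) := by
  induction l with
  | nil => intro a b; rfl
  | cons c t ih =>
    intro a b
    simp only [List.foldl_cons]
    rw [max_assoc, ih]

theorem pvFoldlMax_perm {l₁ l₂ : List Int} (h : l₁.Perm l₂) :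
    ∀ b : Int, l₁.foldl max b = l₂.foldl max b := by
  induction h with
  | nil => intro b; rfl
  | cons x _ ih => intro b; simp only [List.foldl_cons]; exact ih _
  | swap x y l =>
    intro b
    simp only [List.foldl_cons]
    rw [max_right_comm]
  | trans _ _ ih1 ih2 => intro b; rw [ih1, ih2]

-- ---- A side: membership of one level ----
theorem pvMem_aInner (primesL : List Int) (limit j : Int) :
    ∀ (acc : List Int) (x : Int),
      x ∈ primesL.foldl (fun acc k => if k * j ≤ limit then acc ++ [k * j] else acc) acc ↔
        x ∈ acc ∨ ∃ k ∈ primesL, k * j ≤ limit ∧ x = k * j := by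
  induction primesL with
  | nil => intro acc x; simp
  | cons k t ih =>
    intro acc x
    simp only [List.foldl_cons]
    by_cases h : k * j ≤ limit
    · rw [if_pos h, ih]
      simp only [List.mem_append, List.mem_cons, List.not_mem_nil, or_false]
      constructor
      · rintro (⟨hs | rfl⟩ | ⟨k', hk', hkl, rfl⟩)
        · exact Or.inl hs
        · exact Or.inr ⟨k, Or.inl rfl, h, rfl⟩
        · exact Or.inr ⟨k', Or.inr hk', hkl, rfl⟩
      · rintro (hs | ⟨k', (rfl | hk'), hkl, rfl⟩)
        · exact Or.inl (Or.inl hs)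
        · exact Or.inl (Or.inr rfl)
        · exact Or.inr ⟨k', hk', hkl, rfl⟩
    · rw [if_neg h, ih]
      constructor
      · rintro (hs | ⟨k', hk', hkl, rfl⟩)
        · exact Or.inl hs
        · exact Or.inr ⟨k', List.mem_cons_of_mem _ hk', hkl, rfl⟩
      · rintro (hs | ⟨k', hk', hkl, rfl⟩)
        · exact Or.inl hs
        · rcases List.mem_cons.mp hk' with rfl | hk''
          · exact absurd hkl h
          · exact Or.inr ⟨k', hk'', hkl, rfl⟩

theorem pvMem_aAns1 (primesL : List Int) (limit : Int) :
    ∀ (ans acc : List Int) (x : Int),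
      x ∈ ans.foldl (fun acc j =>
          primesL.foldl (fun acc k => if k * j ≤ limit then acc ++ [k * j] else acc) acc) acc ↔
        x ∈ acc ∨ ∃ j ∈ ans, ∃ k ∈ primesL, k * j ≤ limit ∧ x = k * j := by
  intro ans
  induction ans with
  | nil => intro acc x; simp
  | cons j t ih =>
    intro acc x
    simp only [List.foldl_cons]
    rw [ih, pvMem_aInner]
    constructor
    · rintro ((hs | ⟨k, hk, hkl, rfl⟩) | ⟨j', hj', k, hk, hkl, rfl⟩)
      · exact Or.inl hs
      · exact Or.inr ⟨j, List.mem_cons_self .., k, hk, hkl, rfl⟩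
      · exact Or.inr ⟨j', List.mem_cons_of_mem _ hj', k, hk, hkl, rfl⟩
    · rintro (hs | ⟨j', hj', k, hk, hkl, rfl⟩)
      · exact Or.inl (Or.inl hs)
      · rcases List.mem_cons.mp hj' with rfl | hj''
        · exact Or.inl (Or.inr ⟨k, hk, hkl, rfl⟩)
        · exact Or.inr ⟨j', hj'', k, hk, hkl, rfl⟩

def pvLvl (primesL : List Int) (limit : Int) (ans : List Int) : List Int :=
  PySem.Set.ofList (aAns1 primesL limit ans)

theorem pvMem_lvl (primesL : List Int) (limit : Int) (ans : List Int) (x : Int) :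
    x ∈ pvLvl primesL limit ans ↔ ∃ j ∈ ans, ∃ k ∈ primesL, k * j ≤ limit ∧ x = k * j := by
  rw [pvLvl, PySem.Set.mem_ofList]
  unfold aAns1
  rw [pvMem_aAns1]
  simp

-- the concatenation of the successive levels, as A's loop visits them
def pvFlat (primesL : List Int) (limit : Int) : Nat → List Int → List Int
  | 0, _ => []
  | n+1, ans =>
    pvLvl primesL limit ans ++ pvFlat primesL limit n (pvLvl primesL limit ans)

theorem pvMem_flat (primesL : List Int) (limit : Int) :
    ∀ (n : Nat) (ans : List Int) (x : Int),
      x ∈ pvFlat primesL limit n ans ↔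
        ∃ j : Nat, 1 ≤ j ∧ j ≤ n ∧ x ∈ (pvLvl primesL limit)^[j] ans := by
  intro n
  induction n with
  | zero => intro ans x; simp [pvFlat]
  | succ n ih =>
    intro ans x
    simp only [pvFlat, List.mem_append, ih]
    constructor
    · rintro (h | ⟨j, h1, h2, h3⟩)
      · exact ⟨1, le_refl 1, by omega, by simpa using h⟩
      · exact ⟨j + 1, by omega, by omega, by rwa [Function.iterate_succ_apply]⟩
    · rintro ⟨j, h1, h2, h3⟩
      match j, h1 with
      | 1, _ => exact Or.inl (by simpa using h3)
      | j+2, _ =>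
        refine Or.inr ⟨j + 1, by omega, by omega, ?_⟩
        rwa [← Function.iterate_succ_apply]

-- A's loop = length and running max of the flattened level lists
theorem pvALoop_flat (primesL : List Int) (limit minim : Int)
    (hmem : minim ∈ primesL) :
    ∀ (n : Nat) (ans : List Int) (total best w : Int), w ∈ ans →
      (∀ i : Nat, 1 ≤ i → i ≤ n → minim ^ i * w ≤ limit) →
      aLoop primesL limit n ans total best =
        (total + ((pvFlat primesL limit n ans).length : Int),
          (pvFlat primesL limit n ans).foldl max best) := by
  intro n
  induction n with
  | zero => intro ans total best w _ _; simp [aLoop, pvFlat]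
  | succ n ih =>
    intro ans total best w hw hchain
    have hw' : minim * w ∈ pvLvl primesL limit ans := by
      rw [pvMem_lvl]
      exact ⟨w, hw, minim, hmem, by simpa using hchain 1 (by omega) (by omega), rfl⟩
    have hne : pvLvl primesL limit ans ≠ [] := fun h => by rw [h] at hw'; simp at hw'
    cases hmax : PySem.List.max? (pvLvl primesL limit ans) (fun x => x) with
    | none => exact absurd ((PySem.List.max?_eq_none_iff _ _).mp hmax) hne
    | some m =>
      have hmM : m ∈ pvLvl primesL limit ans := PySem.List.max?_mem hmax
      have hmMax : ∀ y ∈ pvLvl primesL limit ans, y ≤ m := PySem.List.max?_isMax hmax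
      have hmax' : PySem.List.max? (PySem.Set.ofList (aAns1 primesL limit ans)) (fun x => x)
          = some m := hmax
      have hstep : aLoop primesL limit (n+1) ans total best =
          aLoop primesL limit n (pvLvl primesL limit ans)
            (total + ((pvLvl primesL limit ans).length : Int)) (max best m) := by
        simp only [aLoop, hmax']
        rfl
      rw [hstep, ih (pvLvl primesL limit ans) _ _ (minim * w) hw'
        (by
          intro i h1 hi
          have := hchain (i + 1) (by omega) (by omega)
          rw [pow_succ] at this
          calc minim ^ i * (minim * w) = minim ^ i * minim * w := by ring
          _ ≤ limit := this)]
      simp only [pvFlat, List.length_append, List.foldl_append]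
      rw [pvFoldlMax_eq m _ best hmM hmMax]
      apply Prod.ext
      · dsimp only; push_cast; ring
      · rfl

-- the common value set: p times a product over the factor list, within the limit
def pvReach (primesL : List Int) (limit p x : Int) : Prop :=
  ∃ s : Multiset Int, (∀ a ∈ s, a ∈ primesL) ∧ x = p * s.prod ∧ x ≤ limit

-- level k of A = the values with a factor multiset of size exactly k
theorem pvLvlIter_char (primesL : List Int) (limit p : Int)
    (h2 : ∀ k ∈ primesL, 2 ≤ k) (hp1 : 1 ≤ p) (hpl : p ≤ limit) :
    ∀ (k : Nat) (x : Int),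
      x ∈ (pvLvl primesL limit)^[k] [p] ↔
        ∃ s : Multiset Int, s.card = k ∧ (∀ a ∈ s, a ∈ primesL) ∧
          x = p * s.prod ∧ x ≤ limit := by
  intro k
  induction k with
  | zero =>
    intro x
    simp only [Function.iterate_zero, id, List.mem_singleton]
    constructor
    · rintro rfl
      exact ⟨0, by simp, by simp, by simp, hpl⟩
    · rintro ⟨s, hcard, _, rfl, _⟩
      rw [Multiset.card_eq_zero.mp hcard]
      simp
  | succ k ih =>
    intro x
    rw [Function.iterate_succ_apply', pvMem_lvl]
    constructor
    · rintro ⟨j, hj, q, hq, hql, rfl⟩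
      obtain ⟨s, hcard, hover, rfl, hlim⟩ := (ih j).mp hj
      refine ⟨q ::ₘ s, by simp [hcard], ?_, by rw [Multiset.prod_cons]; ring, hql⟩
      intro a ha
      rcases Multiset.mem_cons.mp ha with rfl | ha'
      · exact hq
      · exact hover a ha'
    · rintro ⟨s, hcard, hover, rfl, hlim⟩
      obtain ⟨q, hqs⟩ := Multiset.card_pos_iff_exists_mem.mp (by rw [hcard]; exact Nat.succ_pos _)
      obtain ⟨s', rfl⟩ : ∃ s', s = q ::ₘ s' := ⟨s.erase q, (Multiset.cons_erase hqs).symm⟩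
      have hq2 : 2 ≤ q := h2 q (hover q (by simp))
      have hs'1 : 1 ≤ s'.prod := pvProd_ge_one s' (fun b hb => h2 b (hover b (by simp [hb])))
      have hj1 : 1 ≤ p * s'.prod := by nlinarith [mul_le_mul_of_nonneg_left hs'1 (show (0:Int) ≤ p by linarith)]
      have hxval : p * (q ::ₘ s').prod = q * (p * s'.prod) := by
        rw [Multiset.prod_cons]; ring
      have hjlim : p * s'.prod ≤ limit := by
        have : p * s'.prod ≤ q * (p * s'.prod) := le_mul_of_one_le_left (by linarith) (by linarith)
        rw [hxval] at hlim
        omega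
      refine ⟨p * s'.prod, ?_, q, hover q (by simp), by rw [← hxval]; exact hlim, hxval⟩
      exact (ih _).mpr ⟨s', by simpa using hcard, fun a ha => hover a (by simp [ha]), rfl, hjlim⟩

-- ---- B side ----

-- the list of values B's dfs visits, in visit order (proof-side mirror of bDfs)
def specE (limit : Int) : Nat → Int → List Int → List Int
  | 0, v, _ => [v]
  | fuel+1, v, qs =>
    v :: qs.tails.flatMap (fun t =>
      match t with
      | [] => []
      | q :: _ => if v * q ≤ limit then specE limit fuel (v * q) t else [])

theorem pvSpecE_shape (limit : Int) (fuel : Nat) (v : Int) (qs : List Int) :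
    ∃ l, specE limit fuel v qs = v :: l := by
  cases fuel with
  | zero => exact ⟨[], rfl⟩
  | succ f => exact ⟨_, rfl⟩

-- the generic fold step of bDfs over a list of suffixes
theorem pvBFold (limit : Int) (fuel : Nat) (v : Int) :
    ∀ (L : List (List Int)) (acc : Int × Int),
      (∀ t ∈ L, ∀ (q : Int) (t' : List Int), t = q :: t' → v * q ≤ limit →
        bDfs limit fuel (v * q) t =
          (((specE limit fuel (v * q) t).length : Int),
            (specE limit fuel (v * q) t).foldl max (v * q))) →
      L.foldl (fun acc t =>
        match t with
        | [] => acc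
        | q :: _ =>
          if v * q ≤ limit then
            let r := bDfs limit fuel (v * q) t
            (acc.1 + r.1, max acc.2 r.2)
          else acc) acc =
      (acc.1 + ((L.flatMap (fun t =>
          match t with
          | [] => []
          | q :: _ => if v * q ≤ limit then specE limit fuel (v * q) t else [])).length : Int),
        (L.flatMap (fun t =>
          match t with
          | [] => []
          | q :: _ => if v * q ≤ limit then specE limit fuel (v * q) t else [])).foldl max acc.2) := by
  intro L
  induction L with
  | nil => intro acc _; simp
  | cons t L ih =>
    intro acc h
    match t with
    | [] =>
      simp only [List.foldl_cons, List.flatMap_cons]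
      rw [ih _ (fun t ht => h t (by simp [ht]))]
      simp
    | q :: t' =>
      by_cases hql : v * q ≤ limit
      · have hb := h (q :: t') (by simp) q t' rfl hql
        obtain ⟨l, hl⟩ := pvSpecE_shape limit fuel (v * q) (q :: t')
        simp only [List.foldl_cons, List.flatMap_cons, if_pos hql]
        rw [ih _ (fun t ht => h t (by simp [ht])), hb]
        apply Prod.ext
        · dsimp only
          simp only [List.length_append]
          push_cast; ring
        · dsimp only
          rw [List.foldl_append, hl]
          simp only [List.foldl_cons]
          rw [max_self, ← pvFoldlMax_max]
      · simp only [List.foldl_cons, List.flatMap_cons, if_neg hql]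
        rw [ih _ (fun t ht => h t (by simp [ht]))]
        simp

-- bDfs returns the length and the max of specE
theorem pvBDfs_eq_specE (limit : Int) :
    ∀ (fuel : Nat) (v : Int) (qs : List Int),
      bDfs limit fuel v qs =
        (((specE limit fuel v qs).length : Int), (specE limit fuel v qs).foldl max v) := by
  intro fuel
  induction fuel with
  | zero => intro v qs; simp [bDfs, specE]
  | succ fuel ih =>
    intro v qs
    have := pvBFold limit fuel v qs.tails (1, v)
      (fun t _ q t' ht _ => by rw [ih])
    simp only [bDfs, specE]
    rw [this]
    apply Prod.ext
    · dsimp only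
      simp only [List.length_cons]
      push_cast; ring
    · dsimp only
      simp only [List.foldl_cons, max_self]

-- first-suffix decomposition: some tail of qs starts with an element of s and carries the rest
theorem pvCover : ∀ (qs : List Int) (s : Multiset Int), s ≠ 0 → (∀ a ∈ s, a ∈ qs) →
    ∃ t ∈ qs.tails, ∃ (q : Int) (t' : List Int),
      t = q :: t' ∧ q ∈ s ∧ (∀ a ∈ s.erase q, a ∈ t) := by
  intro qs
  induction qs with
  | nil =>
    intro s hne hover
    obtain ⟨a, ha⟩ := Multiset.exists_mem_of_ne_zero hne
    exact absurd (hover a ha) (by simp)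
  | cons q rest ih =>
    intro s hne hover
    by_cases hq : q ∈ s
    · refine ⟨q :: rest, by simp, q, rest, rfl, hq, ?_⟩
      intro a ha
      exact hover a (Multiset.mem_of_mem_erase ha)
    · obtain ⟨t, ht, q', t', hteq, hq', hrest⟩ := ih s hne (by
        intro a ha
        rcases List.mem_cons.mp (hover a ha) with rfl | h'
        · exact absurd ha hq
        · exact h')
      refine ⟨t, ?_, q', t', hteq, hq', hrest⟩
      rw [List.tails_cons]
      exact List.mem_cons_of_mem _ ht

-- membership in specE (with enough fuel)
theorem pvMem_specE (limit : Int) :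
    ∀ (fuel : Nat) (v : Int) (qs : List Int) (x : Int),
      1 ≤ v → v ≤ limit → (∀ q ∈ qs, 2 ≤ q) → limit < v * 2 ^ fuel →
      (x ∈ specE limit fuel v qs ↔
        ∃ s : Multiset Int, (∀ a ∈ s, a ∈ qs) ∧ x = v * s.prod ∧ x ≤ limit) := by
  intro fuel
  induction fuel with
  | zero =>
    intro v qs x hv hvl _ hfuel
    simp only [pow_zero, mul_one] at hfuel
    exact absurd hvl (by omega)
  | succ fuel ih =>
    intro v qs x hv hvl h2 hfuel
    simp only [specE, List.mem_cons, List.mem_flatMap]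
    constructor
    · rintro (rfl | ⟨t, htails, hxt⟩)
      · exact ⟨0, by simp, by simp, hvl⟩
      · match t, hxt with
        | [], hxt => simp at hxt
        | q :: t', hxt =>
          have hxt2 : x ∈ (if v * q ≤ limit then specE limit fuel (v * q) (q :: t') else []) := hxt
          by_cases hql : v * q ≤ limit
          · rw [if_pos hql] at hxt2
            have hsub : ∀ a ∈ q :: t', a ∈ qs :=
              fun a ha => ((List.mem_tails _ _).mp htails).subset ha
            have hq2 : 2 ≤ q := h2 q (hsub q (by simp))
            have hvq1 : 1 ≤ v * q := by nlinarith [mul_le_mul_of_nonneg_left hq2 (show (0:Int) ≤ v by linarith)]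
            have hfuel' : limit < v * q * 2 ^ fuel := by
              have h2f : (0:Int) < 2 ^ fuel := by positivity
              have : v * 2 ^ (fuel + 1) ≤ v * q * 2 ^ fuel := by
                rw [pow_succ]
                nlinarith [mul_nonneg (mul_nonneg (show (0:Int) ≤ v by linarith)
                  (show (0:Int) ≤ (2:Int) ^ fuel by positivity)) (show (0:Int) ≤ q - 2 by linarith)]
              omega
            obtain ⟨s, hover, rfl, hlim⟩ :=
              (ih (v * q) (q :: t') x hvq1 hql (fun a ha => h2 a (hsub a ha)) hfuel').mp hxt2
            refine ⟨q ::ₘ s, ?_, by rw [Multiset.prod_cons]; ring, hlim⟩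
            intro a ha
            rcases Multiset.mem_cons.mp ha with rfl | ha'
            · exact hsub a (by simp)
            · exact hsub a (hover a ha')
          · rw [if_neg hql] at hxt2; simp at hxt2
    · rintro ⟨s, hover, rfl, hlim⟩
      by_cases hs0 : s = 0
      · subst hs0; simp
      · obtain ⟨t, htails, q, t', rfl, hqs, hrest⟩ := pvCover qs s hs0 hover
        right
        refine ⟨q :: t', htails, ?_⟩
        show v * s.prod ∈ (if v * q ≤ limit then specE limit fuel (v * q) (q :: t') else [])
        obtain ⟨s', rfl⟩ : ∃ s', s = q ::ₘ s' := ⟨s.erase q, (Multiset.cons_erase hqs).symm⟩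
        have hq2 : 2 ≤ q := h2 q (hover q (by simp))
        have hs'1 : 1 ≤ s'.prod := pvProd_ge_one s' (fun b hb => h2 b (hover b (by simp [hb])))
        have hval : v * (q ::ₘ s').prod = v * q * s'.prod := by
          rw [Multiset.prod_cons]; ring
        have hql : v * q ≤ limit := by
          have hvq0 : (0:Int) ≤ v * q := by nlinarith [mul_le_mul_of_nonneg_left hq2 (show (0:Int) ≤ v by linarith)]
          have : v * q ≤ v * q * s'.prod := le_mul_of_one_le_right hvq0 hs'1
          rw [hval] at hlim
          omega
        rw [if_pos hql]
        have hvq1 : 1 ≤ v * q := by nlinarith [mul_le_mul_of_nonneg_left hq2 (show (0:Int) ≤ v by linarith)]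
        have hfuel' : limit < v * q * 2 ^ fuel := by
          have h2f : (0:Int) < 2 ^ fuel := by positivity
          have : v * 2 ^ (fuel + 1) ≤ v * q * 2 ^ fuel := by
            rw [pow_succ]
            nlinarith [mul_nonneg (mul_nonneg (show (0:Int) ≤ v by linarith)
              (show (0:Int) ≤ (2:Int) ^ fuel by positivity)) (show (0:Int) ≤ q - 2 by linarith)]
          omega
        have hsub : ∀ a ∈ q :: t', a ∈ qs := fun a ha => ((List.mem_tails _ _).mp htails).subset ha
        refine (ih (v * q) (q :: t') _ hvq1 hql (fun a ha => h2 a (hsub a ha)) hfuel').mpr ?_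
        refine ⟨s', ?_, by rw [hval], hlim⟩
        intro a ha
        have := hrest a (by simpa using ha)
        exact this

-- generic: flatMap of nodup, pairwise-disjoint pieces is nodup
theorem pvNodup_flatMap {α β : Type} (L : List α) (f : α → List β)
    (h1 : ∀ a ∈ L, (f a).Nodup)
    (h2 : L.Pairwise (fun a b => ∀ x, x ∈ f a → x ∈ f b → False)) :
    (L.flatMap f).Nodup := by
  induction L with
  | nil => simp
  | cons a L ih =>
    rw [List.flatMap_cons]
    rcases List.pairwise_cons.mp h2 with ⟨hhead, htail⟩
    refine List.Nodup.append (h1 a (by simp)) (ih (fun b hb => h1 b (by simp [hb])) htail) ?_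
    intro x hxa hxL
    obtain ⟨b, hb, hxb⟩ := List.mem_flatMap.mp hxL
    exact hhead b hb x hxa hxb

-- every later tail is a suffix of the strict tail of an earlier one
theorem pvTails_pairwise {α : Type} : ∀ (l : List α),
    l.tails.Pairwise (fun a b => ∀ (q : α) (a' : List α), a = q :: a' → b <:+ a') := by
  intro l
  induction l with
  | nil => simp
  | cons q rest ih =>
    rw [List.tails_cons]
    refine List.pairwise_cons.mpr ⟨?_, ih⟩
    rintro t ht q' a' heq
    cases heq
    exact (List.mem_tails _ _).mp ht

-- specE is duplicate-free (distinct strictly-sorted primes, enough fuel)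
theorem pvSpecE_nodup (limit : Int) :
    ∀ (fuel : Nat) (v : Int) (qs : List Int),
      1 ≤ v → v ≤ limit → (∀ q ∈ qs, 2 ≤ q ∧ Prime q) → qs.Pairwise (· < ·) →
      limit < v * 2 ^ fuel →
      (specE limit fuel v qs).Nodup := by
  intro fuel
  induction fuel with
  | zero => intro v qs _ _ _ _ _; simp [specE]
  | succ fuel ih =>
    intro v qs hv hvl h2 hsort hfuel
    have hbranch : ∀ t ∈ qs.tails, ∀ (q : Int) (t' : List Int), t = q :: t' → v * q ≤ limit →
        ∀ x ∈ specE limit fuel (v * q) t,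
          ∃ s : Multiset Int, (∀ a ∈ s, a ∈ t) ∧ x = v * q * s.prod ∧ x ≤ limit := by
      rintro t ht q t' rfl hql x hx
      have hsub : ∀ a ∈ q :: t', a ∈ qs := fun a ha => ((List.mem_tails _ _).mp ht).subset ha
      have hq2 : 2 ≤ q := (h2 q (hsub q (by simp))).1
      have hvq1 : 1 ≤ v * q := by nlinarith [mul_le_mul_of_nonneg_left hq2 (show (0:Int) ≤ v by linarith)]
      have hfuel' : limit < v * q * 2 ^ fuel := by
        have h2f : (0:Int) < 2 ^ fuel := by positivity
        have : v * 2 ^ (fuel + 1) ≤ v * q * 2 ^ fuel := by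
              rw [pow_succ]
              nlinarith [mul_nonneg (mul_nonneg (show (0:Int) ≤ v by linarith)
                (show (0:Int) ≤ (2:Int) ^ fuel by positivity)) (show (0:Int) ≤ q - 2 by linarith)]
        omega
      exact (pvMem_specE limit fuel (v * q) (q :: t') x hvq1 hql
        (fun a ha => (h2 a (hsub a ha)).1) hfuel').mp hx
    simp only [specE]
    rw [List.nodup_cons]
    constructor
    · -- v is strictly below every branch value
      intro hvmem
      obtain ⟨t, ht, hxt⟩ := List.mem_flatMap.mp hvmem
      match t, hxt with
      | [], hxt => simp at hxt
      | q :: t', hxt =>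
        have hxt2 : v ∈ (if v * q ≤ limit then specE limit fuel (v * q) (q :: t') else []) := hxt
        by_cases hql : v * q ≤ limit
        · rw [if_pos hql] at hxt2
          obtain ⟨s, hover, hveq, _⟩ := hbranch (q :: t') ht q t' rfl hql v hxt2
          have hq2 : 2 ≤ q := (h2 q (((List.mem_tails _ _).mp ht).subset (by simp))).1
          have hs1 : 1 ≤ s.prod := pvProd_ge_one s (fun b hb =>
            (h2 b (((List.mem_tails _ _).mp ht).subset (hover b hb))).1)
          have hA2 : 2 * v ≤ v * q := by
            nlinarith [mul_le_mul_of_nonneg_left hq2 (show (0:Int) ≤ v by linarith)]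
          have hAs : v * q ≤ v * q * s.prod := le_mul_of_one_le_right (by linarith) hs1
          linarith [hveq]
        · rw [if_neg hql] at hxt2; simp at hxt2
    · -- the branches are nodup and pairwise disjoint
      apply pvNodup_flatMap
      · rintro t ht
        match t with
        | [] => simp
        | q :: t' =>
          show List.Nodup (if v * q ≤ limit then specE limit fuel (v * q) (q :: t') else [])
          by_cases hql : v * q ≤ limit
          · rw [if_pos hql]
            have hsub : ∀ a ∈ q :: t', a ∈ qs := fun a ha => ((List.mem_tails _ _).mp ht).subset ha
            have hq2 : 2 ≤ q := (h2 q (hsub q (by simp))).1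
            have hvq1 : 1 ≤ v * q := by nlinarith [mul_le_mul_of_nonneg_left hq2 (show (0:Int) ≤ v by linarith)]
            have hfuel' : limit < v * q * 2 ^ fuel := by
              have h2f : (0:Int) < 2 ^ fuel := by positivity
              have : v * 2 ^ (fuel + 1) ≤ v * q * 2 ^ fuel := by
                rw [pow_succ]
                nlinarith [mul_nonneg (mul_nonneg (show (0:Int) ≤ v by linarith)
                  (show (0:Int) ≤ (2:Int) ^ fuel by positivity)) (show (0:Int) ≤ q - 2 by linarith)]
              omega
            exact ih (v * q) (q :: t') hvq1 hql (fun a ha => h2 a (hsub a ha))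
              (List.Pairwise.sublist ((List.mem_tails _ _).mp ht).sublist hsort) hfuel'
          · rw [if_neg hql]; simp
      · refine (pvTails_pairwise qs).imp_of_mem ?_
        rintro t1 t2 ht1 ht2 hrel x hx1 hx2
        match t1, hx1, hrel with
        | [], hx1, _ => simp at hx1
        | q1 :: r1, hx1, hrel =>
          match t2, hx2 with
          | [], hx2 => simp at hx2
          | q2 :: r2, hx2 =>
            have hx1b : x ∈ (if v * q1 ≤ limit then specE limit fuel (v * q1) (q1 :: r1) else []) := hx1
            have hx2b : x ∈ (if v * q2 ≤ limit then specE limit fuel (v * q2) (q2 :: r2) else []) := hx2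
            by_cases hql1 : v * q1 ≤ limit
            · by_cases hql2 : v * q2 ≤ limit
              · rw [if_pos hql1] at hx1b
                rw [if_pos hql2] at hx2b
                obtain ⟨s1, hover1, hx1v, _⟩ := hbranch (q1 :: r1) ht1 q1 r1 rfl hql1 x hx1b
                obtain ⟨s2, hover2, hx2v, _⟩ := hbranch (q2 :: r2) ht2 q2 r2 rfl hql2 x hx2b
                have ht2r1 : (q2 :: r2) <:+ r1 := hrel q1 r1 rfl
                have hsub1 : ∀ a ∈ q1 :: r1, a ∈ qs := fun a ha => ((List.mem_tails _ _).mp ht1).subset ha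
                have hsub2 : ∀ a ∈ q2 :: r2, a ∈ qs :=
                  fun a ha => hsub1 a (List.mem_cons_of_mem _ (ht2r1.subset ha))
                have hvne : v ≠ 0 := by omega
                have hprod : (q1 ::ₘ s1).prod = (q2 ::ₘ s2).prod := by
                  apply mul_left_cancel₀ hvne
                  rw [Multiset.prod_cons, Multiset.prod_cons, ← mul_assoc, ← mul_assoc]
                  rw [← hx1v, ← hx2v]
                have hmeq : (q1 ::ₘ s1) = (q2 ::ₘ s2) := by
                  apply pvPrimeInj
                  · intro a ha
                    rcases Multiset.mem_cons.mp ha with rfl | ha'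
                    · exact h2 a (hsub1 a (by simp))
                    · exact h2 a (hsub1 a (hover1 a ha'))
                  · intro a ha
                    rcases Multiset.mem_cons.mp ha with rfl | ha'
                    · exact h2 a (hsub2 a (by simp))
                    · exact h2 a (hsub2 a (hover2 a ha'))
                  · exact hprod
                have hq1r1 : q1 ∈ r1 := by
                  have hq1mem : q1 ∈ (q2 ::ₘ s2) := by rw [← hmeq]; simp
                  rcases Multiset.mem_cons.mp hq1mem with rfl | h'
                  · exact ht2r1.subset (by simp)
                  · exact ht2r1.subset (hover2 q1 h')
                have hlt : ∀ y ∈ r1, q1 < y :=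
                  (List.pairwise_cons.mp (List.Pairwise.sublist ((List.mem_tails _ _).mp ht1).sublist hsort)).1
                exact absurd (hlt q1 hq1r1) (lt_irrefl q1)
              · rw [if_neg hql2] at hx2b; simp at hx2b
            · rw [if_neg hql1] at hx1b; simp at hx1b

-- ---- A's counting while-loop (fuel adequacy and the power chain), as in the port ----
theorem pvAWhile_spec (minim limit : Int) (hm : 2 ≤ minim) :
    ∀ (fuel : Nat) (p : Int), 1 ≤ p →
      (aWhile minim limit fuel p).1 ≤ fuel ∧
      (∀ i : Nat, 1 ≤ i → i ≤ (aWhile minim limit fuel p).1 → minim ^ i * p ≤ limit) ∧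
      ((aWhile minim limit fuel p).1 = fuel ∨
        limit < minim ^ ((aWhile minim limit fuel p).1 + 1) * p) := by
  intro fuel
  induction fuel with
  | zero =>
    intro p hp
    refine ⟨le_refl 0, ?_, Or.inl rfl⟩
    intro i h1 h0
    simp [aWhile] at h0
    omega
  | succ f ih =>
    intro p hp
    by_cases hc : minim * p ≤ limit
    · have hp' : 1 ≤ minim * p := by nlinarith
      obtain ⟨hle, hchain, hend⟩ := ih (minim * p) hp'
      have hunf : aWhile minim limit (f + 1) p
          = ((aWhile minim limit f (minim * p)).1 + 1, (aWhile minim limit f (minim * p)).2) := by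
        simp [aWhile, hc]
      rw [hunf]
      refine ⟨by simpa using Nat.succ_le_succ hle, ?_, ?_⟩
      · intro i h1 hi
        by_cases h1' : i = 1
        · simpa [h1', pow_one] using hc
        · have hj : 1 ≤ i - 1 := by omega
          have hj2 : i - 1 ≤ (aWhile minim limit f (minim * p)).1 := by simp at hi; omega
          have := hchain (i - 1) hj hj2
          have hpow : minim ^ i * p = minim ^ (i - 1) * (minim * p) := by
            conv_lhs => rw [show i = (i - 1) + 1 by omega]
            rw [pow_succ]; ring
          rw [hpow]; exact this
      · rcases hend with h | h
        · exact Or.inl (by simp [h])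
        · refine Or.inr ?_
          have hpow : minim ^ ((aWhile minim limit f (minim * p)).1 + 1 + 1) * p
              = minim ^ ((aWhile minim limit f (minim * p)).1 + 1) * (minim * p) := by
            rw [pow_succ]; ring
          simpa [hpow] using h
    · have hunf : aWhile minim limit (f + 1) p = (0, p) := by simp [aWhile, hc]
      rw [hunf]
      refine ⟨by omega, ?_, Or.inr ?_⟩
      · intro i h1 h0; simp at h0; omega
      · simpa [pow_one] using lt_of_not_ge hc

theorem pvAWhile_fuel (minim limit p : Int) (hm : 2 ≤ minim) (hp : 1 ≤ p) :
    (aWhile minim limit (limit.natAbs + 2) p).1 < limit.natAbs + 2 := by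
  obtain ⟨hle, hchain, _⟩ := pvAWhile_spec minim limit hm (limit.natAbs + 2) p hp
  rcases Nat.lt_or_ge (aWhile minim limit (limit.natAbs + 2) p).1 (limit.natAbs + 2) with h | h
  · exact h
  · exfalso
    have hcF : (aWhile minim limit (limit.natAbs + 2) p).1 = limit.natAbs + 2 := le_antisymm hle h
    have h1 : minim ^ (limit.natAbs + 2) * p ≤ limit := hchain _ (by omega) (by omega)
    have h2 : (2 : Int) ^ (limit.natAbs + 2) ≤ minim ^ (limit.natAbs + 2) :=
      pow_le_pow_left₀ (by norm_num) hm _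
    have h2' : (0 : Int) < minim ^ (limit.natAbs + 2) := by positivity
    have h3 : minim ^ (limit.natAbs + 2) ≤ minim ^ (limit.natAbs + 2) * p := by nlinarith
    have h4 : ((limit.natAbs + 2 : Nat) : Int) < (2 : Int) ^ (limit.natAbs + 2) := by
      exact_mod_cast Nat.lt_two_pow_self
    have h5 : limit ≤ (limit.natAbs : Int) := Int.le_natAbs
    have h6 : limit + 2 ≤ ((limit.natAbs + 2 : Nat) : Int) := by push_cast; linarith [le_abs_self limit]
    linarith

theorem pvFuelBig (limit p : Int) (hp : 1 ≤ p) : limit < p * 2 ^ (limit.natAbs + 2) := by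
  have h4 : ((limit.natAbs + 2 : Nat) : Int) < (2 : Int) ^ (limit.natAbs + 2) := by
    exact_mod_cast Nat.lt_two_pow_self
  have h5 : limit ≤ (limit.natAbs : Int) := Int.le_natAbs
  have h2' : (0 : Int) < 2 ^ (limit.natAbs + 2) := by positivity
  have : (2:Int) ^ (limit.natAbs + 2) ≤ p * 2 ^ (limit.natAbs + 2) :=
    le_mul_of_one_le_left (le_of_lt h2') hp
  push_cast at h4
  linarith [le_abs_self limit, abs_nonneg limit]

-- the flattened level lists are duplicate-free (distinct factor multisets ⇒ distinct values)
theorem pvFlat_nodup (primesL : List Int) (limit p : Int)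
    (h2 : ∀ k ∈ primesL, 2 ≤ k ∧ Prime k) (hp1 : 1 ≤ p) (hpl : p ≤ limit) :
    ∀ (n k : Nat), (pvFlat primesL limit n ((pvLvl primesL limit)^[k] [p])).Nodup := by
  intro n
  induction n with
  | zero => intro k; simp [pvFlat]
  | succ n ih =>
    intro k
    have hrw : pvLvl primesL limit ((pvLvl primesL limit)^[k] [p])
        = (pvLvl primesL limit)^[k+1] [p] := (Function.iterate_succ_apply' _ _ _).symm
    simp only [pvFlat, hrw]
    have hnd1 : ((pvLvl primesL limit)^[k+1] [p]).Nodup := by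
      rw [Function.iterate_succ_apply']
      exact PySem.Set.nodup_ofList _
    refine List.Nodup.append hnd1 (ih (k+1)) ?_
    intro x hx1 hx2
    obtain ⟨j, hj1, hj2, hj3⟩ := (pvMem_flat primesL limit n _ x).mp hx2
    rw [show (pvLvl primesL limit)^[j] ((pvLvl primesL limit)^[k+1] [p])
        = (pvLvl primesL limit)^[j + (k+1)] [p] from (Function.iterate_add_apply _ _ _ _).symm] at hj3
    obtain ⟨s, hcards, hovers, hxs, _⟩ :=
      (pvLvlIter_char primesL limit p (fun a ha => (h2 a ha).1) hp1 hpl (k+1) x).mp hx1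
    obtain ⟨t, hcardt, hovert, hxt, _⟩ :=
      (pvLvlIter_char primesL limit p (fun a ha => (h2 a ha).1) hp1 hpl (j + (k+1)) x).mp hj3
    have hpne : p ≠ 0 := by omega
    have hprods : s.prod = t.prod := mul_left_cancel₀ hpne (hxs ▸ hxt)
    have : s = t := pvPrimeInj s t (fun a ha => h2 a (hovers a ha))
      (fun a ha => h2 a (hovert a ha)) hprods
    rw [this, hcardt] at hcards
    omega

-- A's visited values (p and all the levels) are exactly the reachable products
theorem pvMem_F (primesL : List Int) (limit p minim : Int) (c : Nat)
    (h2 : ∀ k ∈ primesL, 2 ≤ k ∧ Prime k) (hp1 : 1 ≤ p) (hpl : p ≤ limit)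
    (hm2 : 2 ≤ minim) (hminle : ∀ k ∈ primesL, minim ≤ k)
    (hend : limit < minim ^ (c + 1) * p) :
    ∀ x, x ∈ p :: pvFlat primesL limit c [p] ↔ pvReach primesL limit p x := by
  intro x
  have hchar := pvLvlIter_char primesL limit p (fun a ha => (h2 a ha).1) hp1 hpl
  constructor
  · intro hx
    rcases List.mem_cons.mp hx with rfl | hx'
    · exact ⟨0, by simp, by simp, hpl⟩
    · obtain ⟨j, _, _, hj3⟩ := (pvMem_flat primesL limit c [p] x).mp hx'
      have : [p] = (pvLvl primesL limit)^[0] [p] := rfl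
      rw [this] at hj3
      rw [show (pvLvl primesL limit)^[j] ((pvLvl primesL limit)^[0] [p])
          = (pvLvl primesL limit)^[j] [p] from rfl] at hj3
      obtain ⟨s, _, hover, hxv, hlim⟩ := (hchar j x).mp hj3
      exact ⟨s, hover, hxv, hlim⟩
  · rintro ⟨s, hover, rfl, hlim⟩
    rcases Nat.eq_zero_or_pos s.card with hc0 | hcpos
    · rw [Multiset.card_eq_zero.mp hc0]
      simp
    · have hcle : s.card ≤ c := by
        by_contra hgt
        have hc1 : c + 1 ≤ s.card := by omega
        have hpow : minim ^ (c + 1) ≤ minim ^ s.card :=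
          pow_le_pow_right₀ (by omega) hc1
        have hprod : minim ^ s.card ≤ s.prod :=
          pvProd_ge_pow s minim hm2
            (fun a ha => ⟨(h2 a (hover a ha)).1, hminle a (hover a ha)⟩)
        have : minim ^ (c + 1) * p ≤ p * s.prod := by nlinarith
        omega
      refine List.mem_cons_of_mem _ ((pvMem_flat primesL limit c [p] _).mpr
        ⟨s.card, by omega, hcle, ?_⟩)
      exact (hchar s.card _).mpr ⟨s, rfl, hover, rfl, hlim⟩

-- ===== VERDICT (by name: the statement is the Claim_ definition above) =====
theorem count_find_num_spec : Claim_equal_count_find_num := by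
  unfold Claim_equal_count_find_num
  intro primesL limit _ hpre
  unfold Pre_count_find_num at hpre
  unfold Spec_count_find_num count_find_num count_find_num_alt
  by_cases hgt : primesL.foldl (· * ·) 1 > limit
  · simp only [if_pos hgt]
  · simp only [if_neg hgt]
    obtain ⟨hne, hent⟩ : primesL ≠ [] ∧ ∀ x ∈ primesL, 2 ≤ x ∧ x.natAbs.Prime := by
      rcases hpre with h | h
      · exact absurd h hgt
      · exact h
    have h2P : ∀ x ∈ primesL, 2 ≤ x ∧ Prime x := fun x hx =>
      ⟨(hent x hx).1, Int.prime_iff_natAbs_prime.mpr (hent x hx).2⟩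
    set p := primesL.foldl (· * ·) 1 with hpdef
    have hp1 : 1 ≤ p := pvFoldlMul_ge_one primesL 1 le_rfl (fun x hx => (h2P x hx).1)
    have hpl : p ≤ limit := le_of_not_gt hgt
    cases hmin : PySem.List.min? primesL (fun x => x) with
    | none => exact absurd ((PySem.List.min?_eq_none_iff _ _).mp hmin) hne
    | some minim =>
      have hmem : minim ∈ primesL := PySem.List.min?_mem hmin
      have hminle : ∀ k ∈ primesL, minim ≤ k := PySem.List.min?_isMin hmin
      have hm2 : 2 ≤ minim := (h2P minim hmem).1
      -- the while-loop count and its properties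
      obtain ⟨hle, hchain, hend⟩ := pvAWhile_spec minim limit hm2 (limit.natAbs + 2) p hp1
      have hlt := pvAWhile_fuel minim limit p hm2 hp1
      set c := (aWhile minim limit (limit.natAbs + 2) p).1 with hcdef
      have hend' : limit < minim ^ (c + 1) * p := by
        rcases hend with h | h
        · omega
        · exact h
      -- A's loop over the levels
      have hA := pvALoop_flat primesL limit minim hmem c [p] 1 p p (by simp) hchain
      -- B's dfs over the sorted distinct primes
      set primes := PySem.List.sorted (PySem.Set.ofList primesL) (fun x => x) false with hprdef
      have hpm : ∀ q : Int, q ∈ primes ↔ q ∈ primesL := by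
        intro q
        rw [hprdef, (PySem.List.sorted_perm (PySem.Set.ofList primesL) (fun x => x) false).mem_iff,
          PySem.Set.mem_ofList]
      have hsortlt : primes.Pairwise (· < ·) := by
        rw [hprdef]; exact PySem.List.sorted_ofList_pairwise_lt (xs := primesL)
      have hB := pvBDfs_eq_specE limit (limit.natAbs + 2) p primes
      have hfuel : limit < p * 2 ^ (limit.natAbs + 2) := pvFuelBig limit p hp1
      -- the two visit lists are permutations of each other
      set F : List Int := p :: pvFlat primesL limit c [p] with hFdef
      set E : List Int := specE limit (limit.natAbs + 2) p primes with hEdef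
      have hFmem : ∀ x, x ∈ F ↔ pvReach primesL limit p x :=
        pvMem_F primesL limit p minim c h2P hp1 hpl hm2 hminle hend'
      have hEmem : ∀ x, x ∈ E ↔ pvReach primesL limit p x := by
        intro x
        rw [hEdef, pvMem_specE limit (limit.natAbs + 2) p primes x hp1 hpl
          (fun q hq => (h2P q ((hpm q).mp hq)).1) hfuel]
        unfold pvReach
        constructor
        · rintro ⟨s, hover, rfl, hlim⟩
          exact ⟨s, fun a ha => (hpm a).mp (hover a ha), rfl, hlim⟩
        · rintro ⟨s, hover, rfl, hlim⟩
          exact ⟨s, fun a ha => (hpm a).mpr (hover a ha), rfl, hlim⟩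
      have hFnd : F.Nodup := by
        rw [hFdef, List.nodup_cons]
        constructor
        · intro hpf
          obtain ⟨j, hj1, _, hj3⟩ := (pvMem_flat primesL limit c [p] p).mp hpf
          obtain ⟨s, hcard, hover, hps, _⟩ :=
            (pvLvlIter_char primesL limit p (fun a ha => (h2P a ha).1) hp1 hpl j p).mp hj3
          have hprod1 : s.prod = 1 := by
            have hpne : p ≠ 0 := by omega
            have := hps
            nlinarith [mul_left_cancel₀ hpne (show p * 1 = p * s.prod by rw [mul_one]; exact hps)]
          have : (2:Int) ^ s.card ≤ s.prod :=
            pvProd_ge_pow s 2 (le_refl 2)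
              (fun a ha => ⟨(h2P a (hover a ha)).1, (h2P a (hover a ha)).1⟩)
          rw [hprod1, hcard] at this
          have h2j : (2:Int) ≤ 2 ^ j := by
            calc (2:Int) = 2 ^ 1 := by norm_num
            _ ≤ 2 ^ j := pow_le_pow_right₀ (by norm_num) (by omega)
          omega
        · have := pvFlat_nodup primesL limit p h2P hp1 hpl c 0
          simpa using this
      have hEnd : E.Nodup := by
        rw [hEdef]
        exact pvSpecE_nodup limit (limit.natAbs + 2) p primes hp1 hpl
          (fun q hq => h2P q ((hpm q).mp hq)) hsortlt hfuel
      have hperm : F.Perm E :=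
        (List.perm_ext_iff_of_nodup hFnd hEnd).mpr (fun x => by rw [hFmem, hEmem])
      -- assemble
      simp only []
      rw [hA, hB]
      have hlen : (1 : Int) + ((pvFlat primesL limit c [p]).length : Int) = (E.length : Int) := by
        have := hperm.length_eq
        rw [hFdef] at this
        simp only [List.length_cons] at this
        omega
      have hmax : (pvFlat primesL limit c [p]).foldl max p = E.foldl max p := by
        have h1 : F.foldl max p = E.foldl max p := pvFoldlMax_perm hperm p
        rw [hFdef] at h1
        simpa [max_self] using h1
      rw [hlen, hmax]
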